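-- pv_equiv track=rewrite | github.com/hehesam/ACM-rep | leetCode/googleInterveiw/TreesAndGraphs/word Ladder.py | allForms
-- ===== SOURCE A (Python) =====
-- def allForms(wordList):
--     combinations = {}
--     for word in wordList:
--         for i in range(len(word)):
--             starword = word[:i]+'*'+word[i+1:]
--             if starword not in combinations:
--                 combinations[starword] = []
--             combinations[starword].append(word)
--     return combinations
-- ===== SOURCE B (Python) =====
-- def allForms(wordList):
--     pairs = [(w[:i] + '*' + w[i+1:], w)
--              for w in wordList for i in range(len(w))]
--     return {p: [x for q, x in pairs if q == p] for p, _ in pairs}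
-- ===== Notes on version B (the rewrite author's own statement) =====
-- stated objective: simpler
-- what changed: Instead of incrementally growing bucket lists in a dict inside the nested loop, B flattens everything to one (pattern, word) pair list and builds the dict in a single comprehension that gathers each pattern's words by filtering that list (duplicate keys overwrite with the identical value, so first-occurrence key order and within-bucket word order are preserved).
import Mathlib
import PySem

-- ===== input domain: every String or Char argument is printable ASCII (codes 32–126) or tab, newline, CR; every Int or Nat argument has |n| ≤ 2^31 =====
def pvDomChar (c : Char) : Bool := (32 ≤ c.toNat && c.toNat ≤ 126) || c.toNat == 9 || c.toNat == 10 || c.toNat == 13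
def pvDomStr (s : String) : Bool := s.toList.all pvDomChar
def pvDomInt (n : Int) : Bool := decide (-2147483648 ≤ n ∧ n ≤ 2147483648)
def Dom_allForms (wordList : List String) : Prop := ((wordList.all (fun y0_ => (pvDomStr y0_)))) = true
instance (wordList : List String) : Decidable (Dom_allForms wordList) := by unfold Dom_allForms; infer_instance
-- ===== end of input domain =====

-- B builds one flat (pattern, word) pair list and a dict comprehension gathering each
-- pattern's words by filtering it, instead of A's incrementally grown bucket lists.

-- word[:i] + '*' + word[i+1:]  (shared subexpression of both Pythons, ported once)
def pvStar (w : String) (i : Int) : String :=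
  PySem.Str.slice w none (some i) ++ "*" ++ PySem.Str.slice w (some (i + 1)) none

-- ===== PORT A =====
def allForms (wordList : List String) : List (String × List String) :=
  (wordList.foldl (fun combinations word =>
      (PySem.List.pyRange 0 (PySem.Str.len word) 1).foldl (fun combinations i =>
        let starword := pvStar word i
        let combinations :=
          if combinations.contains starword then combinations
          else combinations.insert starword ([] : List String)
        combinations.modify starword [] (fun v => v ++ [word])) combinations)
    PySem.Dict.empty).items

-- ===== PORT B =====
def allForms_alt (wordList : List String) : List (String × List String) :=
  let pairs := wordList.flatMap (fun w =>
    (PySem.List.pyRange 0 (PySem.Str.len w) 1).map (fun i => (pvStar w i, w)))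
  (pairs.foldl (fun d pr =>
      d.insert pr.1 ((pairs.filter (fun q => q.1 == pr.1)).map (fun q => q.2)))
    PySem.Dict.empty).items

-- ===== PRECONDITION & SPEC =====
def Spec_allForms (wordList : List String) (out : List (String × List String)) : Prop := out = allForms_alt wordList
instance (wordList : List String) (out : List (String × List String)) : Decidable (Spec_allForms wordList out) := by unfold Spec_allForms; infer_instance

-- ===== CLAIM (what is proved, stated in full; the proofs are below) =====
def Claim_equal_allForms : Prop := ∀ (wordList : List String), Dom_allForms wordList → Spec_allForms wordList (allForms wordList)

-- ===== LEMMAS AND PROOFS =====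

-- A's loop body (test-then-create, then append) is exactly Dict.modify with default [].
theorem pv_stepA_eq_modify (d : PySem.Dict String (List String)) (p w : String) :
    ((if d.contains p then d else d.insert p ([] : List String)).modify p []
      (fun v => v ++ [w])) = d.modify p [] (fun v => v ++ [w]) := by
  by_cases h : d.contains p = true
  · simp [h]
  · rw [Bool.not_eq_true] at h
    simp only [h, Bool.false_eq_true, if_false, PySem.Dict.modify,
      PySem.Dict.getD_insert_self, PySem.Dict.insert_insert_self,
      PySem.Dict.getD_of_not_contains d ([] : List String) h]

-- A's nested loop is the modify-fold over the flat pair list.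
theorem pv_allForms_dict (wordList : List String) :
    (wordList.foldl (fun combinations word =>
      (PySem.List.pyRange 0 (PySem.Str.len word) 1).foldl (fun combinations i =>
        let starword := pvStar word i
        let combinations :=
          if combinations.contains starword then combinations
          else combinations.insert starword ([] : List String)
        combinations.modify starword [] (fun v => v ++ [word])) combinations)
      PySem.Dict.empty) =
    ((wordList.flatMap (fun w =>
        (PySem.List.pyRange 0 (PySem.Str.len w) 1).map (fun i => (pvStar w i, w)))).foldl
      (fun d pr => d.modify pr.1 [] (fun v => v ++ [pr.2])) PySem.Dict.empty) := by
  rw [List.foldl_flatMap]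
  apply PySem.List.foldl_congr_mem  -- same word list, pointwise-equal inner loops
  intro d w _
  rw [List.foldl_map]
  apply PySem.List.foldl_congr_mem
  intro d' i _
  dsimp only
  exact pv_stepA_eq_modify d' (pvStar w i) w

-- B's fold inserts, at each pair, a value depending only on the key:
-- the result's getD is V c wherever c occurs among the keys of l.
theorem pv_getD_foldl_insert_keyed {κ β ν : Type} [BEq κ] [LawfulBEq κ] [DecidableEq κ]
    (V : κ → ν) (l : List (κ × β)) (d : PySem.Dict κ ν) (c : κ) (dflt : ν) :
    (l.foldl (fun d pr => d.insert pr.1 (V pr.1)) d).getD c dflt =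
      if c ∈ l.map Prod.fst then V c else d.getD c dflt := by
  induction l generalizing d with
  | nil => simp
  | cons pr t ih =>
    simp only [List.foldl_cons, ih, List.map_cons, List.mem_cons]
    by_cases hm : c ∈ t.map Prod.fst
    · simp [hm]
    · by_cases he : c = pr.1 <;> simp [hm, he, PySem.Dict.getD_insert]

theorem allForms_spec' (wordList : List String) :
    allForms wordList = allForms_alt wordList := by
  unfold allForms allForms_alt
  rw [pv_allForms_dict]
  dsimp only
  set pairs : List (String × String) := wordList.flatMap (fun w =>
    (PySem.List.pyRange 0 (PySem.Str.len w) 1).map (fun i => (pvStar w i, w))) with hpairs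
  have hkA : (pairs.foldl (fun d pr => d.modify pr.1 [] (fun v => v ++ [pr.2]))
      PySem.Dict.empty).keys = PySem.Set.ofList (pairs.map Prod.fst) := by
    rw [PySem.Dict.keys_foldl_modify_key pairs Prod.fst ([] : List String)
      (fun _ pr => fun v => v ++ [pr.2]) PySem.Dict.empty]
    simp [PySem.Set.update_nil_left]
  have hkB : (pairs.foldl (fun d pr =>
      d.insert pr.1 ((pairs.filter (fun q => q.1 == pr.1)).map (fun q => q.2)))
      PySem.Dict.empty).keys = PySem.Set.ofList (pairs.map Prod.fst) := by
    rw [PySem.Dict.keys_foldl_insert_key pairs Prod.fst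
      (fun _ pr => (pairs.filter (fun q => q.1 == pr.1)).map (fun q => q.2)) PySem.Dict.empty]
    simp [PySem.Set.update_nil_left]
  rw [PySem.Dict.items_eq_map_keys _ (by rw [hkA]; exact PySem.Set.nodup_ofList _) ([] : List String),
      PySem.Dict.items_eq_map_keys _ (by rw [hkB]; exact PySem.Set.nodup_ofList _) ([] : List String),
      hkA, hkB]
  apply List.map_congr_left
  intro c hc
  have hcm : c ∈ pairs.map Prod.fst := (PySem.Set.mem_ofList _ _).mp hc
  rw [PySem.Dict.getD_foldl_modify_append,
      pv_getD_foldl_insert_keyed (fun k => (pairs.filter (fun q => q.1 == k)).map (fun q => q.2))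
        pairs PySem.Dict.empty c ([] : List String)]
  simp [hcm, PySem.Dict.getD_empty]

-- ===== VERDICT (by name: the statement is the Claim_ definition above) =====
theorem allForms_spec : Claim_equal_allForms := by
  intro wordList _
  unfold Spec_allForms
  exact allForms_spec' wordList
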